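-- pv_equiv track=rewrite | github.com/cjm15271278/Deep-Q-learning-trading-strategy | stock_env_zero_sig.py | timejoined
-- ===== SOURCE A (Python) =====
-- def timejoined(Y):  #定义time-joined transformation函数
--     Y.append(Y[-1])
--     l1=[]
--
--     for j in range(2*(len(Y))+1+2):
--         if j==0:
--             l1.append((Y[j][0], 0))
--             continue
--         for i in range(len(Y)-1):
--             if j==2*i+1:
--                 l1.append((Y[i][0], Y[i][1]))
--                 break
--             if j==2*i+2:
--                 l1.append((Y[i+1][0], Y[i][1]))
--                 break
--     return l1
-- ===== SOURCE B (Python) =====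
-- def timejoined(Y):
--     # Same in-place mutation as the original (appends a copy of the last pair).
--     Y.append(Y[-1])
--     out = [(Y[0][0], 0)]
--     for i in range(len(Y) - 1):
--         out.append((Y[i][0], Y[i][1]))
--         out.append((Y[i + 1][0], Y[i][1]))
--     return out
-- ===== Notes on version B (the rewrite author's own statement) =====
-- stated objective: faster
-- what changed: Replaced the outer loop over j with an inner linear scan searching for the matching index (O(n^2)) by a single direct pass over i that emits both step pairs at once (O(n)).
import Mathlib
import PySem

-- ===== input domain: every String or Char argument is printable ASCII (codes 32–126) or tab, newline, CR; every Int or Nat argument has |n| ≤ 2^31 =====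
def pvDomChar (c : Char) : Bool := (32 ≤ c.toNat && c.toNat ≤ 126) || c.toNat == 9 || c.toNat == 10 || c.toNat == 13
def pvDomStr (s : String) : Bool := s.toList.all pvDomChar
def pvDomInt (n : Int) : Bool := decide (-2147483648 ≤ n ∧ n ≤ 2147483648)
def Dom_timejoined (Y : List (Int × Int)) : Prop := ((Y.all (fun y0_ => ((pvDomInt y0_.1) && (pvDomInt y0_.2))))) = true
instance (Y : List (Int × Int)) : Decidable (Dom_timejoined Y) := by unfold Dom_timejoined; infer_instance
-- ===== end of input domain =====

-- B replaces A's nested scan (outer j-loop, inner i-search) by one direct pass over i: faster (O(n) vs O(n^2)).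
-- Both A and B mutate the argument in place (append a copy of the last pair); the equivalence proved is about the return value.

-- ===== PORT A =====
-- inner 'for i in range(len(Y)-1)' with its two checked conditions and 'break'
def timejoinedInner (Y2 : List (Int × Int)) (j : Int) : List Int → List (Int × Int)
  | [] => []
  | i :: rest =>
    if j = 2*i+1 then
      [((PySem.List.pyGetD Y2 i (0,0)).1, (PySem.List.pyGetD Y2 i (0,0)).2)]
    else if j = 2*i+2 then
      [((PySem.List.pyGetD Y2 (i+1) (0,0)).1, (PySem.List.pyGetD Y2 i (0,0)).2)]
    else timejoinedInner Y2 j rest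

def timejoined (Y : List (Int × Int)) : List (Int × Int) :=
  match PySem.List.pyGet? Y (-1) with
  | none => []   -- IndexError in Python; excluded by Pre_
  | some last =>
    let Y2 := Y ++ [last]
    let N : Int := Y2.length
    (PySem.List.pyRange 0 (2*N+1+2) 1).foldl (fun l1 j =>
      if j = 0 then l1 ++ [((PySem.List.pyGetD Y2 j (0,0)).1, 0)]
      else l1 ++ timejoinedInner Y2 j (PySem.List.pyRange 0 (N-1) 1)) []

-- ===== PORT B =====
def timejoined_alt (Y : List (Int × Int)) : List (Int × Int) :=
  match PySem.List.pyGet? Y (-1) with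
  | none => []   -- IndexError in Python; excluded by Pre_
  | some last =>
    let Y2 := Y ++ [last]
    let N : Int := Y2.length
    (PySem.List.pyRange 0 (N-1) 1).foldl (fun out i =>
      out ++ [((PySem.List.pyGetD Y2 i (0,0)).1, (PySem.List.pyGetD Y2 i (0,0)).2),
              ((PySem.List.pyGetD Y2 (i+1) (0,0)).1, (PySem.List.pyGetD Y2 i (0,0)).2)])
      [((PySem.List.pyGetD Y2 0 (0,0)).1, 0)]

-- ===== PRECONDITION & SPEC =====
-- Python A raises IndexError on the empty list (Y[-1]); excluded.
def Pre_timejoined (Y : List (Int × Int)) : Prop := Y ≠ []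
instance (Y : List (Int × Int)) : Decidable (Pre_timejoined Y) := by unfold Pre_timejoined; infer_instance
def pvWitness_timejoined : (List (Int × Int)) := [(1, 2)]

def Spec_timejoined (Y : List (Int × Int)) (out : List (Int × Int)) : Prop := out = timejoined_alt Y
instance (Y : List (Int × Int)) (out : List (Int × Int)) : Decidable (Spec_timejoined Y out) := by unfold Spec_timejoined; infer_instance

-- ===== CLAIM (what is proved, stated in full; the proofs are below) =====
def Claim_equal_timejoined : Prop := ∀ (Y : List (Int × Int)), Dom_timejoined Y → Pre_timejoined Y → Spec_timejoined Y (timejoined Y)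

-- ===== LEMMAS AND PROOFS =====

-- the inner scan returns [] when j is beyond every candidate
lemma innerNil (Y2 : List (Int × Int)) (j : Int) :
    ∀ is : List Int, (∀ i ∈ is, 2*i+2 < j) → timejoinedInner Y2 j is = [] := by
  intro is
  induction is with
  | nil => intro _; rfl
  | cons i rest ih =>
    intro h
    have hi := h i (List.mem_cons_self ..)
    rw [timejoinedInner, if_neg (by omega), if_neg (by omega)]
    exact ih fun x hx => h x (List.mem_cons_of_mem _ hx)

-- for an odd target j = 2k+1 the scan from a ≤ k fires exactly at i = k
lemma innerOdd (Y2 : List (Int × Int)) (k b : Int) (hb : k < b) :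
    ∀ (n : Nat) (a : Int), a ≤ k → (k - a).toNat = n →
    timejoinedInner Y2 (2*k+1) (PySem.List.pyRange a b 1)
      = [((PySem.List.pyGetD Y2 k (0,0)).1, (PySem.List.pyGetD Y2 k (0,0)).2)] := by
  intro n
  induction n with
  | zero =>
    intro a h1 h2
    have hak : a = k := by omega
    subst hak
    rw [PySem.List.pyRange_one_cons (by omega), timejoinedInner, if_pos rfl]
  | succ n ih =>
    intro a h1 h2
    rw [PySem.List.pyRange_one_cons (by omega), timejoinedInner,
        if_neg (by omega), if_neg (by omega)]
    exact ih (a+1) (by omega) (by omega)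

-- for an even target j = 2k+2 the scan from a ≤ k fires exactly at i = k
lemma innerEven (Y2 : List (Int × Int)) (k b : Int) (hb : k < b) :
    ∀ (n : Nat) (a : Int), a ≤ k → (k - a).toNat = n →
    timejoinedInner Y2 (2*k+2) (PySem.List.pyRange a b 1)
      = [((PySem.List.pyGetD Y2 (k+1) (0,0)).1, (PySem.List.pyGetD Y2 k (0,0)).2)] := by
  intro n
  induction n with
  | zero =>
    intro a h1 h2
    have hak : a = k := by omega
    subst hak
    rw [PySem.List.pyRange_one_cons (by omega), timejoinedInner,
        if_neg (by omega), if_pos rfl]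
  | succ n ih =>
    intro a h1 h2
    rw [PySem.List.pyRange_one_cons (by omega), timejoinedInner,
        if_neg (by omega), if_neg (by omega)]
    exact ih (a+1) (by omega) (by omega)

-- A's remaining j-loop from j = 2k+1 computes B's remaining i-loop from i = k
lemma outerLoop (Y2 : List (Int × Int)) (N : Int) (hN : N = (Y2.length : Int)) :
    ∀ (n : Nat) (k : Int), 0 ≤ k → k ≤ N - 1 → (N - 1 - k).toNat = n →
    ∀ acc : List (Int × Int),
    (PySem.List.pyRange (2*k+1) (2*N+1+2) 1).foldl (fun l1 j =>
        if j = 0 then l1 ++ [((PySem.List.pyGetD Y2 j (0,0)).1, 0)]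
        else l1 ++ timejoinedInner Y2 j (PySem.List.pyRange 0 (N-1) 1)) acc
    = (PySem.List.pyRange k (N-1) 1).foldl (fun out i =>
        out ++ [((PySem.List.pyGetD Y2 i (0,0)).1, (PySem.List.pyGetD Y2 i (0,0)).2),
                ((PySem.List.pyGetD Y2 (i+1) (0,0)).1, (PySem.List.pyGetD Y2 i (0,0)).2)]) acc := by
  intro n
  induction n with
  | zero =>
    intro k hk0 hk1 hn acc
    have hkN : k = N - 1 := by omega
    subst hkN
    have hdead : ∀ j : Int, 2*N - 2 < j →
        timejoinedInner Y2 j (PySem.List.pyRange 0 (N-1) 1) = [] := by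
      intro j hj
      exact innerNil Y2 j _ (fun i hi => by
        have := (PySem.List.mem_pyRange_one).1 hi; omega)
    rw [show PySem.List.pyRange (N-1) (N-1) 1 = [] from PySem.List.pyRange_one_eq_nil (le_refl _)]
    rw [PySem.List.pyRange_one_cons (show 2*(N-1)+1 < 2*N+1+2 by omega),
        PySem.List.pyRange_one_cons (show 2*(N-1)+1+1 < 2*N+1+2 by omega),
        PySem.List.pyRange_one_cons (show 2*(N-1)+1+1+1 < 2*N+1+2 by omega),
        PySem.List.pyRange_one_cons (show 2*(N-1)+1+1+1+1 < 2*N+1+2 by omega),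
        show PySem.List.pyRange (2*(N-1)+1+1+1+1+1) (2*N+1+2) 1 = [] from
          PySem.List.pyRange_one_eq_nil (by omega)]
    simp only [List.foldl_cons, List.foldl_nil]
    rw [if_neg (by omega), if_neg (by omega), if_neg (by omega), if_neg (by omega),
        hdead _ (by omega), hdead _ (by omega), hdead _ (by omega), hdead _ (by omega)]
    simp
  | succ n ih =>
    intro k hk0 hk1 hn acc
    have hkN : k < N - 1 := by omega
    rw [PySem.List.pyRange_one_cons (show 2*k+1 < 2*N+1+2 by omega)]
    rw [show 2*k+1+1 = 2*k+2 by ring]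
    rw [PySem.List.pyRange_one_cons (show 2*k+2 < 2*N+1+2 by omega)]
    rw [PySem.List.pyRange_one_cons hkN]
    simp only [List.foldl_cons]
    rw [if_neg (by omega), if_neg (by omega)]
    rw [innerOdd Y2 k (N-1) hkN k.toNat 0 hk0 (by omega),
        innerEven Y2 k (N-1) hkN k.toNat 0 hk0 (by omega)]
    rw [show 2*k+2+1 = 2*(k+1)+1 by ring]
    rw [ih (k+1) (by omega) (by omega) (by omega)]
    simp

-- ===== VERDICT (by name: the statement is the Claim_ definition above) =====
theorem timejoined_spec : Claim_equal_timejoined := by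
  intro Y _ hpre
  unfold Spec_timejoined timejoined timejoined_alt
  cases hY : PySem.List.pyGet? Y (-1) with
  | none =>
    exfalso
    rw [PySem.List.pyGet?_neg_one] at hY
    exact hpre (List.getLast?_eq_none_iff.1 hY)
  | some last =>
    simp only []
    set Y2 := Y ++ [last] with hY2
    set N : Int := (Y2.length : Int) with hNdef
    have hN2 : 2 ≤ N := by
      have : Y ≠ [] := hpre
      have hlen : 1 ≤ Y.length := List.length_pos_iff.2 this
      simp only [hNdef, hY2, List.length_append, List.length_cons, List.length_nil]
      omega
    rw [PySem.List.pyRange_one_cons (by omega : (0:Int) < 2*N+1+2)]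
    simp only [List.foldl_cons, reduceIte, List.nil_append]
    rw [show (0:Int)+1 = 2*0+1 by ring]
    rw [outerLoop Y2 N rfl (N-1).toNat 0 (by omega) (by omega) (by omega)]
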